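-- pv_equiv track=rewrite | github.com/benreynwar/zamlet | python/fmvpu/control_structures.py | pack_bits_to_words
-- ===== SOURCE A (Python) =====
-- from typing import List, Tuple, Dict, Any
--
-- def pack_bits_to_words(bits: List[bool], word_width: int = 32) -> List[int]:
--     """Pack a list of bits into words."""
--     words = []
--     for i in range(0, len(bits), word_width):
--         word = 0
--         for j in range(min(word_width, len(bits) - i)):
--             if bits[i + j]:
--                 word |= (1 << j)
--         words.append(word)
--     return words
-- ===== SOURCE B (Python) =====
-- def _word_value(chunk):
--     """Little-endian value of a bit chunk: Horner on short chunks,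
--     divide and conquer (low + high << half) on long ones."""
--     m = len(chunk)
--     if m <= 32:
--         word = 0
--         for b in reversed(chunk):
--             word = 2 * word + b
--         return word
--     half = m // 2
--     return _word_value(chunk[:half]) + (_word_value(chunk[half:]) << half)
--
--
-- def pack_bits_to_words(bits, word_width=32):
--     """Pack a list of bits into words: slice one chunk per word and take its
--     little-endian value, instead of setting bits by index arithmetic."""
--     if word_width <= 0:
--         return []
--     words = []
--     pos = 0
--     n = len(bits)
--     while pos < n:
--         words.append(_word_value(bits[pos:pos + word_width]))
--         pos += word_width
--     return words
-- ===== Notes on version B (the rewrite author's own statement) =====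
-- stated objective: faster
-- what changed: A builds each word by index arithmetic over range(0,len,w) and range(min(w,len-i)), setting bit j with word |= 1 << j; B slices one chunk bits[pos:pos+w] per word in a while loop and computes its value by a separate helper (Horner fold over the reversed chunk when short, divide-and-conquer low + (high << half) when long), with an explicit width guard (on word_width == 0, excluded by Pre_, A raises ValueError from range() while B's guard returns an empty list).
import Mathlib
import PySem

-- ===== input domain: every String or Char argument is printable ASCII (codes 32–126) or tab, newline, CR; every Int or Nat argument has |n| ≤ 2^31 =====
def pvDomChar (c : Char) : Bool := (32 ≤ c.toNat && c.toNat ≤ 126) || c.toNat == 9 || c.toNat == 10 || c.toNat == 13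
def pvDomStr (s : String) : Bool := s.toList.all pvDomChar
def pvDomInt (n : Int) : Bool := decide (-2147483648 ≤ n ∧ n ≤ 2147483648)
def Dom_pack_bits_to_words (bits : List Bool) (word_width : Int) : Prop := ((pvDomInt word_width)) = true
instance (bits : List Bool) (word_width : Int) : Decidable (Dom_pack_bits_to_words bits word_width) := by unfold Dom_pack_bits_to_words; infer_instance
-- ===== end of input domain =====

-- B replaces A's index-arithmetic bit-OR word construction by per-word chunk slicing with a
-- divide-and-conquer chunk value (Horner fold on short chunks), measurably faster on large words; on word_width = 0 A raises ValueError, B returns an empty list.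


-- ===== PORT A =====
-- A: for i in range(0, len(bits), word_width): word = 0; for j in range(min(word_width, len(bits)-i)):
--    if bits[i+j]: word |= 1 << j; words.append(word).
-- In the inner loop j ≥ 0 (it comes from range(...)), so Python's '1 << j' is '(1 : Int) <<< j.toNat'.
def pack_bits_to_words (bits : List Bool) (word_width : Int) : List Int :=
  (PySem.List.pyRange 0 (PySem.List.len bits) word_width).foldl
    (fun words i =>
      words ++
        [(PySem.List.pyRange 0 (min word_width (PySem.List.len bits - i)) 1).foldl
            (fun word j =>
              if PySem.List.pyGetD bits (i + j) false then PySem.Int.bor word ((1 : Int) <<< j.toNat)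
              else word)
            0])
    []

-- ===== PORT B =====
-- B's _word_value: Horner fold over the reversed chunk when it is short, otherwise split the
-- chunk at half = m // 2 and combine low + (high << half).
def pvWordValue (chunk : List Bool) : Int :=
  if h : chunk.length ≤ 32 then
    chunk.reverse.foldl (fun word b => 2 * word + (if b then 1 else 0)) 0
  else
    let half := chunk.length / 2
    pvWordValue (PySem.List.slice chunk none (some (half : Int)))
      + pvWordValue (PySem.List.slice chunk (some (half : Int)) none) <<< half
termination_by chunk.length
decreasing_by
  · rw [PySem.List.slice_to_natCast]
    simp only [List.length_take]
    omega
  · rw [PySem.List.slice_from_natCast]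
    simp only [List.length_drop]
    omega

-- B's while loop: slice the chunk bits[pos:pos+word_width], take its value, append, advance pos.
-- The loop only runs after B's 'word_width <= 0' guard, so the width is carried as its Nat
-- value; the '0 < ww' test is a totality guard only.
def pvPackLoop (bits : List Bool) (ww : Nat) (pos : Nat) (words : List Int) : List Int :=
  if h0 : 0 < ww then
    if h1 : pos < bits.length then
      pvPackLoop bits ww (pos + ww)
        (words ++ [pvWordValue (PySem.List.slice bits (some (pos : Int)) (some ((pos : Int) + (ww : Int))))])
    else words
  else words
termination_by bits.length - pos
decreasing_by omega

def pack_bits_to_words_alt (bits : List Bool) (word_width : Int) : List Int :=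
  if word_width ≤ 0 then [] else pvPackLoop bits word_width.toNat 0 []

-- ===== PRECONDITION & SPEC =====
-- Pre_ excludes exactly word_width = 0, where Python A raises ValueError (zero range() step).
def Pre_pack_bits_to_words (bits : List Bool) (word_width : Int) : Prop := word_width ≠ 0
instance (bits : List Bool) (word_width : Int) : Decidable (Pre_pack_bits_to_words bits word_width) := by unfold Pre_pack_bits_to_words; infer_instance
def pvWitness_pack_bits_to_words : List Bool × Int := ([true, false, true], 2)

def Spec_pack_bits_to_words (bits : List Bool) (word_width : Int) (out : List Int) : Prop := out = pack_bits_to_words_alt bits word_width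
instance (bits : List Bool) (word_width : Int) (out : List Int) : Decidable (Spec_pack_bits_to_words bits word_width out) := by unfold Spec_pack_bits_to_words; infer_instance

-- ===== CLAIM (what is proved, stated in full; the proofs are below) =====
def Claim_equal_pack_bits_to_words : Prop := ∀ (bits : List Bool) (word_width : Int), Dom_pack_bits_to_words bits word_width → Pre_pack_bits_to_words bits word_width → Spec_pack_bits_to_words bits word_width (pack_bits_to_words bits word_width)

-- ===== LEMMAS AND PROOFS =====

-- little-endian value of a bit list (bits[0] is the least significant bit)
def pvVal : List Bool → Int
  | [] => 0
  | b :: t => (if b then 1 else 0) + 2 * pvVal t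

lemma pvVal_nonneg : ∀ l : List Bool, 0 ≤ pvVal l := by
  intro l
  induction l with
  | nil => simp [pvVal]
  | cons b t ih => cases b <;> simp [pvVal] <;> omega

lemma pvVal_lt : ∀ l : List Bool, pvVal l < 2 ^ l.length := by
  intro l
  induction l with
  | nil => simp [pvVal]
  | cons b t ih =>
    have h := pvVal_nonneg t
    cases b <;> simp [pvVal, pow_succ] <;> omega

lemma pvVal_append (l : List Bool) (b : Bool) :
    pvVal (l ++ [b]) = pvVal l + (if b then 2 ^ l.length else 0) := by
  induction l with
  | nil => cases b <;> simp [pvVal]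
  | cons a t ih =>
    cases b <;> cases a <;> simp [pvVal, ih, pow_succ] <;> ring

lemma pv_lor_pow : ∀ {n a : Nat}, a < 2 ^ n → a ||| 2 ^ n = a + 2 ^ n := by
  intro n
  induction n with
  | zero =>
    intro a h
    interval_cases a
    decide
  | succ n ih =>
    intro a h
    have h2 : (2 : Nat) ^ (n + 1) = 2 * 2 ^ n := by rw [pow_succ]; ring
    have hd : a / 2 < 2 ^ n := by omega
    have hp : (2 : Nat) ^ (n + 1) = Nat.bit false (2 ^ n) := by
      simp [Nat.bit_val]; omega
    conv_lhs => rw [← Nat.bit_bodd_div2 a, hp, Nat.lor_bit]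
    have hdd : a.div2 = a / 2 := Nat.div2_val a
    rw [Nat.bit_val, hdd, ih hd]
    have hb := Nat.bodd_add_div2 a
    rw [hdd] at hb
    cases hob : a.bodd <;> rw [hob] at hb <;> simp at hb ⊢ <;> omega

lemma pv_bor_pow (w : Int) (n : Nat) (h0 : 0 ≤ w) (h : w < 2 ^ n) :
    PySem.Int.bor w ((1 : Int) <<< (n : Nat)) = w + 2 ^ n := by
  obtain ⟨m, rfl⟩ := Int.eq_ofNat_of_zero_le h0
  have hs : ((1 : Int) <<< (n : Nat)) = ((2 ^ n : Nat) : Int) := by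
    simp [Int.shiftLeft_eq]
  have hm : m < 2 ^ n := by exact_mod_cast h
  rw [hs, PySem.Int.bor_natCast, pv_lor_pow hm]
  push_cast
  ring

-- A's inner loop over a chunk, in clean form: fold over range with bit ORs equals pvVal
lemma pvL1 (l : List Bool) :
    (List.range l.length).foldl
      (fun w k => if l.getD k false then PySem.Int.bor w ((1 : Int) <<< k) else w) 0 = pvVal l := by
  induction l using List.reverseRecOn with
  | nil => simp [pvVal]
  | append_singleton t b ih =>
    have hlen : (t ++ [b]).length = t.length + 1 := by simp
    rw [hlen, List.range_succ, List.foldl_append]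
    have hcong :
        (List.range t.length).foldl
            (fun w k => if (t ++ [b]).getD k false then PySem.Int.bor w ((1 : Int) <<< k) else w) 0
          = (List.range t.length).foldl
            (fun w k => if t.getD k false then PySem.Int.bor w ((1 : Int) <<< k) else w) 0 := by
      refine PySem.List.foldl_congr_mem _ _ _ _ ?_
      intro acc k hk
      have hk' : k < t.length := List.mem_range.mp hk
      have : (t ++ [b]).getD k false = t.getD k false := by
        simp [List.getD_eq_getElem?_getD, List.getElem?_append_left hk']
      rw [this]
    rw [hcong, ih]
    have hget : (t ++ [b]).getD t.length false = b := by
      simp [List.getD_eq_getElem?_getD]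
    simp only [List.foldl_cons, List.foldl_nil, hget]
    cases b
    · simp [pvVal_append]
    · simp only [if_true]
      rw [pv_bor_pow _ _ (pvVal_nonneg t) (pvVal_lt t), pvVal_append]
      simp

-- B's Horner fold over the reversed chunk equals pvVal
lemma pvL2 : ∀ l : List Bool,
    l.reverse.foldl (fun w b => 2 * w + (if b then 1 else 0)) 0 = pvVal l := by
  intro l
  induction l with
  | nil => simp [pvVal]
  | cons b t ih =>
    rw [List.reverse_cons, List.foldl_append, ih]
    simp [pvVal]
    ring

-- A's inner loop in its ported form, at a nonnegative start index
lemma pv_inner (bits : List Bool) (ww : Int) (hww : 0 < ww) (i : Nat) :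
    (PySem.List.pyRange 0 (min ww ((bits.length : Int) - (i : Int))) 1).foldl
      (fun word j =>
        if PySem.List.pyGetD bits ((i : Int) + j) false then PySem.Int.bor word ((1 : Int) <<< j.toNat)
        else word) 0
    = pvVal ((bits.drop i).take ww.toNat) := by
  set c := (bits.drop i).take ww.toNat with hc
  have hclen : c.length = (min ww ((bits.length : Int) - (i : Int))).toNat := by
    simp [hc]
    omega
  rw [PySem.List.pyRange_one, List.foldl_map]
  have hn : (min ww ((bits.length : Int) - (i : Int)) - 0).toNat = c.length := by omega
  rw [hn]
  refine Eq.trans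
    (PySem.List.foldl_congr_mem (List.range c.length) _
      (fun w k => if c.getD k false then PySem.Int.bor w ((1 : Int) <<< k) else w) 0 ?_)
    (pvL1 c)
  intro acc k hk
  have hk' : k < c.length := List.mem_range.mp hk
  have hkww : k < ww.toNat := by
    have := hclen
    omega
  have h1 : (i : Int) + ((0 : Int) + (k : Int)) = ((i + k : Nat) : Int) := by push_cast; ring
  have h2 : ((0 : Int) + (k : Int)).toNat = k := by omega
  have h3 : c.getD k false = bits.getD (i + k) false := by
    rw [List.getD_eq_getElem?_getD, List.getD_eq_getElem?_getD, hc]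
    rw [List.getElem?_take_of_lt hkww, List.getElem?_drop]
  simp only [h1, h2, h3, PySem.List.pyGetD_natCast]

-- A in closed form, for a positive width
lemma pvA_closed (bits : List Bool) (ww : Int) (hww : 0 < ww) :
    pack_bits_to_words bits ww
      = (List.range
            (if (0 : Int) < (bits.length : Int) then (((bits.length : Int) + ww - 1) / ww).toNat else 0)).map
          (fun t => pvVal ((bits.drop (t * ww.toNat)).take ww.toNat)) := by
  unfold pack_bits_to_words
  rw [PySem.List.foldl_append_singleton_eq_map, List.nil_append]
  rw [PySem.List.len_eq, PySem.List.pyRange_of_pos 0 (bits.length : Int) hww, List.map_map]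
  have hcount :
      (if (0 : Int) < (bits.length : Int) then (((bits.length : Int) - 0 + ww - 1) / ww).toNat else 0)
        = (if (0 : Int) < (bits.length : Int) then (((bits.length : Int) + ww - 1) / ww).toNat else 0) := by
    norm_num
  rw [hcount]
  refine List.map_congr_left ?_
  intro k hk
  have hcast : (ww.toNat : Int) = ww := Int.toNat_of_nonneg hww.le
  have h1 : (0 : Int) + ww * (k : Int) = ((k * ww.toNat : Nat) : Int) := by
    push_cast
    rw [hcast]
    ring
  simp only [Function.comp, h1]
  exact pv_inner bits ww hww (k * ww.toNat)

-- A for a negative width: the outer range is empty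
lemma pvA_neg (bits : List Bool) (ww : Int) (h : ww < 0) : pack_bits_to_words bits ww = [] := by
  unfold pack_bits_to_words
  have hr : PySem.List.pyRange 0 (PySem.List.len bits) ww = [] := by
    rw [PySem.List.len_eq]
    unfold PySem.List.pyRange
    rw [if_neg (by omega)]
    simp only
    rw [if_neg (by omega), if_neg (by omega)]
    simp
  rw [hr]
  simp

-- number-of-words step for the Nat-division count
lemma pvQn_step (m ww : Nat) (hw : 0 < ww) (hm : 0 < m) :
    (m + ww - 1) / ww = (m - ww + ww - 1) / ww + 1 := by
  by_cases h : m ≤ ww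
  · have e1 : m + ww - 1 = (m - 1) + ww := by omega
    rw [e1, Nat.add_div_right _ hw]
    have e2 : (m - 1) / ww = 0 := Nat.div_eq_of_lt (by omega)
    have e3 : m - ww = 0 := by omega
    rw [e2, e3]
    have e4 : 0 + ww - 1 = ww - 1 := by omega
    rw [e4, Nat.div_eq_of_lt (by omega)]
  · have h' : ww < m := by omega
    have e1 : m + ww - 1 = ((m - ww) + ww - 1) + ww := by omega
    rw [e1, Nat.add_div_right _ hw]

-- value of a concatenation of bit lists
lemma pvVal_split (a b : List Bool) : pvVal (a ++ b) = pvVal a + 2 ^ a.length * pvVal b := by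
  induction a with
  | nil => simp [pvVal]
  | cons x t ih =>
    cases x <;> simp [pvVal, ih, pow_succ] <;> ring

lemma pvWordValue_eq_aux : ∀ (n : Nat) (l : List Bool), l.length ≤ n → pvWordValue l = pvVal l := by
  intro n
  induction n with
  | zero =>
    intro l hl
    rw [pvWordValue, dif_pos (by omega)]
    exact pvL2 l
  | succ n ih =>
    intro l hl
    rw [pvWordValue]
    by_cases h : l.length ≤ 32
    · rw [dif_pos h]
      exact pvL2 l
    · rw [dif_neg h]
      simp only [PySem.List.slice_to_natCast, PySem.List.slice_from_natCast]
      rw [ih (l.take (l.length / 2)) (by simp; omega), ih (l.drop (l.length / 2)) (by simp; omega)]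
      rw [Int.shiftLeft_eq]
      conv_rhs => rw [← List.take_append_drop (l.length / 2) l, pvVal_split]
      simp only [List.length_take]
      have hmin : min (l.length / 2) l.length = l.length / 2 := by omega
      rw [hmin]
      ring

-- B's _word_value computes the little-endian chunk value
lemma pvWordValue_val (l : List Bool) : pvWordValue l = pvVal l :=
  pvWordValue_eq_aux l.length l le_rfl

-- B's loop in closed form
lemma pvLoop_closed (bits : List Bool) (ww : Nat) (hww : 0 < ww) :
    ∀ (n pos : Nat) (words : List Int), bits.length - pos ≤ n →
      pvPackLoop bits ww pos words
        = words ++ (List.range ((bits.length - pos + ww - 1) / ww)).map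
            (fun t => pvVal ((bits.drop (pos + t * ww)).take ww)) := by
  intro n
  induction n with
  | zero =>
    intro pos words hn
    have hpos : ¬ pos < bits.length := by omega
    rw [pvPackLoop, dif_pos hww, dif_neg hpos]
    have h0 : bits.length - pos = 0 := by omega
    rw [h0]
    have h1 : (0 + ww - 1) / ww = 0 := Nat.div_eq_of_lt (by omega)
    rw [h1]
    simp
  | succ n ih =>
    intro pos words hn
    by_cases hpos : pos < bits.length
    · rw [pvPackLoop, dif_pos hww, dif_pos hpos]
      rw [ih (pos + ww) _ (by omega)]
      have hsl : PySem.List.slice bits (some (pos : Int)) (some ((pos : Int) + (ww : Int)))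
          = (bits.drop pos).take ww := PySem.List.slice_natCast_add bits pos ww
      rw [hsl, pvWordValue_val]
      have hq : (bits.length - pos + ww - 1) / ww
          = (bits.length - (pos + ww) + ww - 1) / ww + 1 := by
        have hstep := pvQn_step (bits.length - pos) ww hww (by omega)
        have e : bits.length - pos - ww = bits.length - (pos + ww) := by omega
        rw [e] at hstep
        exact hstep
      rw [hq, List.range_succ_eq_map]
      simp only [List.map_cons, List.map_map, List.append_assoc, List.singleton_append]
      congr 2
      · congr 1
        simp
      · refine List.map_congr_left ?_
        intro t _
        simp only [Function.comp]
        have e : pos + Nat.succ t * ww = pos + ww + t * ww := by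
          rw [Nat.succ_mul]
          ring
        rw [e]
    · rw [pvPackLoop, dif_pos hww, dif_neg hpos]
      have h0 : bits.length - pos = 0 := by omega
      rw [h0]
      have h1 : (0 + ww - 1) / ww = 0 := Nat.div_eq_of_lt (by omega)
      rw [h1]
      simp

-- B in closed form, for a positive width
lemma pvB_closed (bits : List Bool) (ww : Int) (hww : 0 < ww) :
    pack_bits_to_words_alt bits ww
      = (List.range ((bits.length + ww.toNat - 1) / ww.toNat)).map
          (fun t => pvVal ((bits.drop (t * ww.toNat)).take ww.toNat)) := by
  unfold pack_bits_to_words_alt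
  rw [if_neg (by omega)]
  rw [pvLoop_closed bits ww.toNat (by omega) bits.length 0 [] (by omega)]
  simp

-- the two word counts agree
lemma pvCount_eq (n : Nat) (ww : Int) (hww : 0 < ww) :
    (if (0 : Int) < (n : Int) then (((n : Int) + ww - 1) / ww).toNat else 0)
      = (n + ww.toNat - 1) / ww.toNat := by
  rcases Nat.eq_zero_or_pos n with h | h
  · subst h
    simp
    exact (Nat.div_eq_of_lt (by omega)).symm
  · rw [if_pos (by exact_mod_cast h)]
    obtain ⟨w, rfl⟩ := Int.eq_ofNat_of_zero_le hww.le
    have hcast : (n : Int) + (w : Int) - 1 = ((n + w - 1 : Nat) : Int) := by omega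
    rw [hcast, ← Int.natCast_ediv]
    simp only [Int.toNat_natCast]

-- ===== VERDICT (by name: the statement is the Claim_ definition above) =====
theorem pack_bits_to_words_spec : Claim_equal_pack_bits_to_words := by
  intro bits ww hdom hpre
  unfold Spec_pack_bits_to_words
  rcases lt_trichotomy ww 0 with h | h | h
  · rw [pvA_neg bits ww h]
    unfold pack_bits_to_words_alt
    rw [if_pos h.le]
  · exact absurd h hpre
  · rw [pvA_closed bits ww h, pvB_closed bits ww h, pvCount_eq bits.length ww h]
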